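-- pv_equiv track=rewrite | github.com/SamathareddyAnisetti/Message-Decoding | msg_decoding1.py | hash_table_for
-- ===== SOURCE A (Python) =====
-- def hash_table_for(header):     ## this function will return the hash_table for the header
--     header_count = 0
--     hash_table = {}
--     for length in range(1,8):       ## this loop is used to maintain all lengths in order for the sequence of keys
--         flag = 0
--         for integer_key in range((2**length)-1):     ##this loop is used to maintain the sequence from 0 to 2**n -1 for every length
--             if header_count == len(header):
--                 flag = 1
--                 break
--             binary_key = bin(integer_key)[2:]
--             binary_key = "0" * (length - len(binary_key)) + binary_key
--             hash_table[binary_key] = header[header_count]           ## all characters are mappped to the keys in a specified sequence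
--             header_count += 1
--         if flag == 1:
--             break
--     return hash_table
-- ===== SOURCE B (Python) =====
-- def hash_table_for(header):
--     # Inverted decomposition: instead of enumerating all candidate keys and
--     # consuming header characters until they run out, walk over the header
--     # positions and COMPUTE each position's key from its index k: first locate
--     # the key length l (and the index base of that length block), then extract
--     # the l base-2 digits of k - base with divmod.
--     table = {}
--     for k in range(min(len(header), 247)):
--         base = 0
--         for l in range(1, 8):
--             size = 2 ** l - 1
--             if k < base + size:
--                 break
--             base += size
--         i = k - base
--         digits = []
--         for _ in range(l):
--             i, r = divmod(i, 2)
--             digits.append("01"[r])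
--         table["".join(reversed(digits))] = header[k]
--     return table
-- ===== Notes on version B (the rewrite author's own statement) =====
-- stated objective: alternative
-- what changed: B inverts the iteration: instead of enumerating all candidate keys (nested length x key loops with a header counter, flag and breaks) and consuming header characters, it loops over the header positions and computes each position's key directly from its index k, by locating the length block containing k and extracting the base-2 digits of the offset with divmod.
import Mathlib
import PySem

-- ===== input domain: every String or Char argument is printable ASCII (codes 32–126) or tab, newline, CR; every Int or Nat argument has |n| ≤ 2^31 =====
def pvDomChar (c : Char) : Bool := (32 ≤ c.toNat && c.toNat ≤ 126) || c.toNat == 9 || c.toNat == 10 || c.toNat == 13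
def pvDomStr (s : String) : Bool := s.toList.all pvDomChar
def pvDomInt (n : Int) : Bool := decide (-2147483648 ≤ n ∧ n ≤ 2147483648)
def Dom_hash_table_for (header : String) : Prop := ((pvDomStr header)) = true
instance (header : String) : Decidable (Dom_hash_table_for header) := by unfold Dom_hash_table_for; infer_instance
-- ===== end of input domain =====

-- B inverts A's iteration: it walks the header positions and computes each position's key
-- from its index (length-block search + divmod digit extraction) instead of enumerating
-- all candidate keys and consuming header characters (objective: alternative algorithm).

-- ===== PORT A =====
-- "0" * (length - len(bk)) + bk   (negative repeat count gives "", as in Python)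
def pvPadA (length : Int) (bk : String) : String :=
  String.ofList (List.replicate (length - PySem.Str.len bk).toNat '0' ++ bk.toList)

-- binary_key = bin(integer_key)[2:];  then zero-padded to `length`
def pvKeyA (length i : Int) : String :=
  pvPadA length (PySem.Str.slice (PySem.Int.pyBin i) (some 2) none)

-- the inner `for integer_key in range(...)` loop with its break; returns (header_count, hash_table, flag)
def pvInnerA (header : String) (length : Int) :
    List Int → Int → PySem.Dict String String → Int × PySem.Dict String String × Bool
  | [], count, d => (count, d, false)
  | i :: rest, count, d =>
    if count = PySem.Str.len header then (count, d, true)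
    else
      match PySem.Str.pyGet? header count with
      | some c => pvInnerA header length rest (count + 1) (d.insert (pvKeyA length i) (String.ofList [c]))
      | none => (count, d, true)  -- IndexError branch, unreachable: here 0 ≤ count < len(header)

-- the outer `for length in range(1,8)` loop with its flag-controlled break
def pvOuterA (header : String) :
    List Int → Int → PySem.Dict String String → PySem.Dict String String
  | [], _, d => d
  | l :: rest, count, d =>
    match pvInnerA header l (PySem.List.pyRange 0 ((2 : Int) ^ l.toNat - 1) 1) count d with
    | (count', d', flag) => if flag then d' else pvOuterA header rest count' d'

def hash_table_for (header : String) : List (String × String) :=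
  (pvOuterA header (PySem.List.pyRange 1 8 1) 0 PySem.Dict.empty).items

-- ===== PORT B =====
-- the `for l in range(1, 8): size = 2**l - 1; if k < base + size: break; base += size`
-- length-search loop; returns (l, base) as left by the loop
def pvFindLB (k : Int) : List Int → Int → Int → Int × Int
  | [], l, base => (l, base)
  | x :: rest, _, base =>
    if k < base + ((2 : Int) ^ x.toNat - 1) then (x, base)
    else pvFindLB k rest x (base + ((2 : Int) ^ x.toNat - 1))

-- the `for _ in range(l): i, r = divmod(i, 2); digits.append("01"[r])` loop
-- ("01"[r]: r = i % 2 ∈ {0,1} since the divisor 2 is positive, so pyGet? is some and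
--  the .getD default is unreachable)
def pvDigitsB : Nat → Int → List String → Int × List String
  | 0, i, ds => (i, ds)
  | n + 1, i, ds =>
    pvDigitsB n (PySem.Int.floordiv i 2)
      (ds ++ [String.ofList [(PySem.Str.pyGet? "01" (PySem.Int.mod i 2)).getD '?']])

-- the body of B's loop that builds position k's key: length search, then digit extraction
def pvKeyB (k : Int) : String :=
  let lb := pvFindLB k (PySem.List.pyRange 1 8 1) 0 0
  PySem.Str.join "" ((pvDigitsB lb.1.toNat (k - lb.2) []).2).reverse

-- the outer `for k in range(min(len(header), 247))` loop
def pvLoopB (header : String) : List Int → PySem.Dict String String → PySem.Dict String String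
  | [], d => d
  | k :: rest, d =>
    match PySem.Str.pyGet? header k with
    | some c => pvLoopB header rest (d.insert (pvKeyB k) (String.ofList [c]))
    | none => pvLoopB header rest d  -- IndexError branch, unreachable: 0 ≤ k < len(header)

def hash_table_for_alt (header : String) : List (String × String) :=
  (pvLoopB header (PySem.List.pyRange 0 (min (PySem.Str.len header) 247) 1) PySem.Dict.empty).items

-- ===== PRECONDITION & SPEC =====
def Spec_hash_table_for (header : String) (out : List (String × String)) : Prop := out = hash_table_for_alt header
instance (header : String) (out : List (String × String)) : Decidable (Spec_hash_table_for header out) := by unfold Spec_hash_table_for; infer_instance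

-- ===== CLAIM (what is proved, stated in full; the proofs are below) =====
def Claim_equal_hash_table_for : Prop := ∀ (header : String), Dom_hash_table_for header → Spec_hash_table_for header (hash_table_for header)

-- ===== LEMMAS AND PROOFS =====

def pvInsertAll (d : PySem.Dict String String) (ps : List (String × String)) :
    PySem.Dict String String :=
  ps.foldl (fun d p => d.insert p.1 p.2) d

theorem pvInsertAll_append (d : PySem.Dict String String) (ps qs : List (String × String)) :
    pvInsertAll d (ps ++ qs) = pvInsertAll (pvInsertAll d ps) qs := by
  simp [pvInsertAll]

theorem pvZip_append {α β : Type} (a b : List α) (xs : List β) :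
    (a ++ b).zip xs = a.zip xs ++ b.zip (xs.drop a.length) := by
  induction a generalizing xs with
  | nil => simp
  | cons h t ih =>
    cases xs with
    | nil => simp
    | cons x xs => simp [List.zip_cons_cons, ih]

theorem pvInnerA_spec (header : String) (length : Int) (ints : List Int)
    (count : Int) (d : PySem.Dict String String)
    (h0 : 0 ≤ count) (hle : count ≤ (header.toList.length : Int)) :
    pvInnerA header length ints count d =
      (count + min (ints.length : Int) ((header.toList.length : Int) - count),
       pvInsertAll d ((ints.map (pvKeyA length)).zip
         ((header.toList.map (fun c => String.ofList [c])).drop count.toNat)),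
       decide ((header.toList.length : Int) - count < (ints.length : Int))) := by
  have hL : header.toList.length = header.length := by simp
  induction ints generalizing count d with
  | nil =>
    refine Prod.ext ?_ (Prod.ext ?_ ?_) <;> simp [pvInnerA, pvInsertAll] <;> omega
  | cons i rest ih =>
    by_cases hc : count = (header.toList.length : Int)
    · have hceq : count = PySem.Str.len header := by rw [PySem.Str.len_eq]; exact hc
      have hdropnil : (header.toList.map (fun c => String.ofList [c])).drop count.toNat = [] := by
        apply List.drop_eq_nil_of_le; simp; omega
      rw [pvInnerA, if_pos hceq, hdropnil]
      refine Prod.ext ?_ (Prod.ext ?_ ?_)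
      · omega
      · simp [pvInsertAll]
      · simp; omega
    · have hlt : count < (header.toList.length : Int) := lt_of_le_of_ne hle hc
      have hnat : count.toNat < header.toList.length := by omega
      have hget : PySem.Str.pyGet? header count = some (header.toList[count.toNat]'hnat) := by
        obtain ⟨k, rfl⟩ : ∃ k : Nat, count = (k : Int) := ⟨count.toNat, by omega⟩
        rw [PySem.Str.pyGet?_natCast]
        simp_all
      have hcne : ¬ count = PySem.Str.len header := by rw [PySem.Str.len_eq]; exact hc
      have hdrop :
          (header.toList.map (fun c => String.ofList [c])).drop count.toNat =
            String.ofList [(header.toList[count.toNat]'hnat)] ::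
              (header.toList.map (fun c => String.ofList [c])).drop (count.toNat + 1) := by
        rw [← List.getElem_cons_drop (by simpa using hnat)]
        simp
      rw [pvInnerA, if_neg hcne, hget]
      dsimp only
      rw [ih (count + 1) _ (by omega) (by omega)]
      have htn : (count + 1).toNat = count.toNat + 1 := by omega
      refine Prod.ext ?_ (Prod.ext ?_ ?_) <;>
        simp [hdrop, htn, pvInsertAll] <;> omega

def pvKeysOf (ls : List Int) : List String :=
  ls.flatMap (fun l => (PySem.List.pyRange 0 ((2 : Int) ^ l.toNat - 1) 1).map (pvKeyA l))

theorem pvOuterA_spec (header : String) (ls : List Int) (count : Int)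
    (d : PySem.Dict String String)
    (h0 : 0 ≤ count) (hle : count ≤ (header.toList.length : Int)) :
    pvOuterA header ls count d =
      pvInsertAll d ((pvKeysOf ls).zip
        ((header.toList.map (fun c => String.ofList [c])).drop count.toNat)) := by
  induction ls generalizing count d with
  | nil => simp [pvOuterA, pvKeysOf, pvInsertAll]
  | cons l rest ih =>
    have hL : header.toList.length = header.length := by simp
    have hsplit : pvKeysOf (l :: rest) =
        ((PySem.List.pyRange 0 ((2 : Int) ^ l.toNat - 1) 1).map (pvKeyA l)) ++ pvKeysOf rest := by
      simp [pvKeysOf]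
    rw [pvOuterA, pvInnerA_spec header l _ count d h0 hle, hsplit, pvZip_append,
      pvInsertAll_append]
    by_cases hflag : (header.toList.length : Int) - count <
        ((PySem.List.pyRange 0 ((2 : Int) ^ l.toNat - 1) 1).length : Int)
    · have hz : ((header.toList.map (fun c => String.ofList [c])).drop count.toNat).drop
          ((PySem.List.pyRange 0 ((2 : Int) ^ l.toNat - 1) 1).map (pvKeyA l)).length = [] := by
        apply List.drop_eq_nil_of_le
        simp only [List.length_drop, List.length_map]
        omega
      simp only [hflag, decide_true, if_true, hz]
      simp [pvInsertAll]
    · have hcnt : count + min ((PySem.List.pyRange 0 ((2 : Int) ^ l.toNat - 1) 1).length : Int)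
          ((header.toList.length : Int) - count)
          = count + ((PySem.List.pyRange 0 ((2 : Int) ^ l.toNat - 1) 1).length : Int) := by
        omega
      simp only [hflag, decide_false, Bool.false_eq_true, if_false]
      rw [hcnt]
      rw [ih _ _ (by omega) (by omega)]
      congr 2
      rw [List.drop_drop, List.length_map]
      congr 1
      omega

-- B's per-index key computation reproduces A's 247 keys, in order
set_option maxRecDepth 100000 in
set_option maxHeartbeats 2000000 in
theorem pvKeys_eq :
    (PySem.List.pyRange 0 247 1).map pvKeyB = pvKeysOf (PySem.List.pyRange 1 8 1) := by
  decide

set_option maxRecDepth 100000 in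
theorem pvKeysOf_length : (pvKeysOf (PySem.List.pyRange 1 8 1)).length = 247 := by
  decide

-- B's loop is an insert-fold over (key, char) pairs when every index is in range
theorem pvLoopB_spec (header : String) (ks : List Int) (d : PySem.Dict String String)
    (h : ∀ k ∈ ks, 0 ≤ k ∧ k < (header.toList.length : Int)) :
    pvLoopB header ks d =
      pvInsertAll d (ks.map (fun k =>
        (pvKeyB k, String.ofList [header.toList[k.toNat]?.getD '?']))) := by
  induction ks generalizing d with
  | nil => simp [pvLoopB, pvInsertAll]
  | cons k rest ih =>
    obtain ⟨hk0, hklt⟩ := h k (by simp)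
    have hnat : k.toNat < header.toList.length := by omega
    have hget : PySem.Str.pyGet? header k = some (header.toList[k.toNat]'hnat) := by
      obtain ⟨j, rfl⟩ : ∃ j : Nat, k = (j : Int) := ⟨k.toNat, by omega⟩
      rw [PySem.Str.pyGet?_natCast]
      simp_all
    rw [pvLoopB, hget]
    dsimp only
    rw [ih _ (fun x hx => h x (by simp [hx]))]
    simp only [pvInsertAll, List.map_cons, List.foldl_cons, List.getElem?_eq_getElem hnat,
      Option.getD_some]

-- ===== VERDICT (by name: the statement is the Claim_ definition above) =====
theorem hash_table_for_spec : Claim_equal_hash_table_for := by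
  intro header _
  unfold Spec_hash_table_for hash_table_for hash_table_for_alt
  rw [pvOuterA_spec header _ 0 PySem.Dict.empty le_rfl (by positivity)]
  have hmin : min (PySem.Str.len header) 247 = ((min header.toList.length 247 : Nat) : Int) := by
    rw [PySem.Str.len_eq]; omega
  rw [pvLoopB_spec header _ PySem.Dict.empty (by
    intro k hk
    rw [hmin, PySem.List.mem_pyRange_one] at hk
    constructor
    · exact hk.1
    · calc k < ((min header.toList.length 247 : Nat) : Int) := hk.2
        _ ≤ (header.toList.length : Int) := by omega)]
  congr 1
  -- the two pair lists coincide elementwise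
  congr 1
  rw [hmin]
  simp only [Int.toNat_zero, List.drop_zero]
  symm
  apply List.ext_getElem
  · simp only [List.length_map, PySem.List.length_pyRange_one, List.length_zip,
      pvKeysOf_length]
    omega
  · intro j hj1 hj2
    have hjlt : j < min header.toList.length 247 := by
      simpa [PySem.List.length_pyRange_one] using hj1
    have hj247 : j < 247 := by omega
    have hjM : j < header.toList.length := by omega
    rw [List.getElem_map, PySem.List.getElem_pyRange_one, List.getElem_zip]
    refine Prod.ext ?_ ?_
    · show pvKeyB (0 + (j : Int)) = _
      have hkey := List.getElem_of_eq pvKeys_eq.symm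
        (i := j) (by rw [pvKeysOf_length]; omega)
      rw [hkey, List.getElem_map, PySem.List.getElem_pyRange_one]
    · simp [List.getElem?_eq_getElem hjM]
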